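-- pv_equiv track=rewrite | github.com/PremPatel8/Competitive_Coding | Binarysearch.com/Number of Non-Overlapping Sublists With Sum of Target.py | solve
-- ===== SOURCE A (Python) =====
-- def solve(nums, target):
--     res = 0
--     currPrefixSum = 0
--     seen = set([0]) # need to add 0 for the case where the nums[i] value is equal to the target value
--
--     for no in nums:
--         currPrefixSum += no
--
--         # we are looking for sublists whose sum equals target, and a quick way to calculate the sum of a sublist of range (b,e] is
--         # prefixSum[e] - prefixSum[b]
--         # so if prefixSum[e] - prefixSum[b] = target then
--         # prefixSum[b] = prefixSum[e] - target
--         # if prefixSum[b] exists in our set that means we have found a sublist whose total equals target,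
--         priorPrefixSum = currPrefixSum-target
--
--         if priorPrefixSum in seen:
--             res += 1
--             # we need to clear the set as we do not allow overlap between sublists
--             seen.clear()
--
--         seen.add(currPrefixSum)
--
--     return res
-- ===== SOURCE B (Python) =====
-- def solve(nums, target):
--     res = 0
--     # sums of all sublists ending at the current position that started after the last counted match
--     sums = set()
--     for no in nums:
--         sums = {s + no for s in sums}
--         sums.add(no)
--         if target in sums:
--             res += 1
--             sums = set()
--     return res
-- ===== Notes on version B (the rewrite author's own statement) =====
-- stated objective: alternative
-- what changed: B maintains a set of sums of sublists ending at the current position (shifted by each new element, reset after a match) and tests 'target in sums', instead of A's running prefix sum checked against a set of earlier prefix sums.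
import Mathlib
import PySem

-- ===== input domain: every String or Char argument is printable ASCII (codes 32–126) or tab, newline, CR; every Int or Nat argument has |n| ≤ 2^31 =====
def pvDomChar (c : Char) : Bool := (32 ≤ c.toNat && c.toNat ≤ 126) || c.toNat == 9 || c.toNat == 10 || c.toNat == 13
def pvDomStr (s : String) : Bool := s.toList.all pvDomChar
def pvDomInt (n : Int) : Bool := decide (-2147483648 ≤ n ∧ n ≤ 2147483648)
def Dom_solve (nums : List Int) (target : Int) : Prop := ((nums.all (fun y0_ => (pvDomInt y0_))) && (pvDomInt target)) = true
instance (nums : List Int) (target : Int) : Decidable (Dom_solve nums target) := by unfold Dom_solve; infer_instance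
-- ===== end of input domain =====

-- B replaces A's prefix-sum set with a set of sums of sublists ending at the current
-- position, reset after each match: an alternative state of similar size (no speed claim).

-- ===== PORT A =====
-- loop body of A: state (res, currPrefixSum, seen)
def solveStepA (target : Int) (st : Int × Int × PySem.Set Int) (no : Int) : Int × Int × PySem.Set Int :=
  let res := st.1
  let currPrefixSum := st.2.1 + no
  let seen := st.2.2
  let priorPrefixSum := currPrefixSum - target
  if PySem.Set.contains seen priorPrefixSum then
    -- res += 1; seen.clear(); seen.add(currPrefixSum)
    (res + 1, currPrefixSum, PySem.Set.add PySem.Set.empty currPrefixSum)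
  else
    (res, currPrefixSum, PySem.Set.add seen currPrefixSum)

def solve (nums : List Int) (target : Int) : Int :=
  (nums.foldl (solveStepA target) (0, 0, PySem.Set.ofList [0])).1

-- ===== PORT B =====
-- loop body of B: state (res, sums)
def solveStepB (target : Int) (st : Int × PySem.Set Int) (no : Int) : Int × PySem.Set Int :=
  let sums := PySem.Set.add (PySem.Set.ofList (st.2.map (fun s => s + no))) no
  if PySem.Set.contains sums target then
    (st.1 + 1, PySem.Set.empty)
  else
    (st.1, sums)

def solve_alt (nums : List Int) (target : Int) : Int :=
  (nums.foldl (solveStepB target) (0, PySem.Set.empty)).1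

-- ===== PRECONDITION & SPEC =====
def Spec_solve (nums : List Int) (target : Int) (out : Int) : Prop := out = solve_alt nums target
instance (nums : List Int) (target : Int) (out : Int) : Decidable (Spec_solve nums target out) := by unfold Spec_solve; infer_instance

-- ===== CLAIM (what is proved, stated in full; the proofs are below) =====
def Claim_equal_solve : Prop := ∀ (nums : List Int) (target : Int), Dom_solve nums target → Spec_solve nums target (solve nums target)

-- ===== LEMMAS AND PROOFS =====

-- Invariant linking the two loop states: an int x is a sum of a currently-allowed
-- sublist ending here (or x = 0) iff currPrefixSum - x is a stored prefix sum.
lemma loop_agree (target : Int) : ∀ (nums : List Int) (res curr : Int)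
    (seen sums : PySem.Set Int),
    (∀ x : Int, (curr - x) ∈ seen ↔ (x ∈ sums ∨ x = 0)) →
    (nums.foldl (solveStepA target) (res, curr, seen)).1
      = (nums.foldl (solveStepB target) (res, sums)).1 := by
  intro nums
  induction nums with
  | nil => intro res curr seen sums _; rfl
  | cons no rest ih =>
    intro res curr seen sums hinv
    simp only [List.foldl_cons]
    have hcond : PySem.Set.contains
        (PySem.Set.add (PySem.Set.ofList (sums.map (fun s => s + no))) no) target
        = PySem.Set.contains seen (curr + no - target) := by
      have h1 : target ∈ PySem.Set.add (PySem.Set.ofList (sums.map (fun s => s + no))) no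
          ↔ (curr + no - target) ∈ seen := by
        rw [PySem.Set.mem_add, PySem.Set.mem_ofList, List.mem_map]
        constructor
        · rintro (⟨s, hs, hsx⟩ | h)
          · have := (hinv (target - no)).2 (Or.inl (by simpa [show target - no = s by omega] using hs))
            simpa [show curr - (target - no) = curr + no - target by ring] using this
          · have := (hinv (target - no)).2 (Or.inr (by omega))
            simpa [show curr - (target - no) = curr + no - target by ring] using this
        · intro h
          have := (hinv (target - no)).1
            (by simpa [show curr - (target - no) = curr + no - target by ring] using h)
          rcases this with h' | h'
          · exact Or.inl ⟨target - no, h', by ring⟩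
          · exact Or.inr (by omega)
      exact Bool.coe_iff_coe.mp
        (by rw [PySem.Set.contains_iff, PySem.Set.contains_iff]; exact h1)
    by_cases hc : (curr + no - target) ∈ seen
    · have hcA : PySem.Set.contains seen (curr + no - target) = true :=
        (PySem.Set.contains_iff _ _).2 hc
      simp only [solveStepA, solveStepB, hcond, hcA, if_true]
      apply ih
      intro x
      rw [PySem.Set.mem_add]
      constructor
      · rintro (h | h)
        · simp [PySem.Set.empty] at h
        · exact Or.inr (by omega)
      · rintro (h | h)
        · simp [PySem.Set.empty] at h
        · exact Or.inr (by omega)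
    · have hcA : PySem.Set.contains seen (curr + no - target) = false := by
        rw [← Bool.not_eq_true, PySem.Set.contains_iff]; exact hc
      simp only [solveStepA, solveStepB, hcond, hcA, if_false, Bool.false_eq_true]
      apply ih
      intro x
      rw [PySem.Set.mem_add, PySem.Set.mem_add, PySem.Set.mem_ofList, List.mem_map]
      constructor
      · rintro (h | h)
        · have := (hinv (x - no)).1
            (by simpa [show curr - (x - no) = curr + no - x by ring] using h)
          rcases this with h' | h'
          · exact Or.inl (Or.inl ⟨x - no, h', by ring⟩)
          · exact Or.inl (Or.inr (by omega))
        · exact Or.inr (by omega)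
      · rintro ((⟨s, hs, hsx⟩ | h) | h)
        · have := (hinv (x - no)).2 (Or.inl (by simpa [show x - no = s by omega] using hs))
          exact Or.inl (by simpa [show curr - (x - no) = curr + no - x by ring] using this)
        · have := (hinv (x - no)).2 (Or.inr (by omega))
          exact Or.inl (by simpa [show curr - (x - no) = curr + no - x by ring] using this)
        · exact Or.inr (by omega)

-- ===== VERDICT (by name: the statement is the Claim_ definition above) =====
theorem solve_spec : Claim_equal_solve := by
  intro nums target _
  show solve nums target = solve_alt nums target
  unfold solve solve_alt
  apply loop_agree
  intro x
  simp [PySem.Set.ofList, PySem.Set.empty, PySem.Set.add]
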